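-- pv_equiv track=rewrite | github.com/dorin133/ANLP | utils/hypothesis_utils.py | identify_thoughts
-- ===== SOURCE A (Python) =====
-- def identify_thoughts(tokens, markers=None):
--     """
--     Group tokens into thought chunks based on markers or sentence boundaries.
--     For this example, we'll use periods as thought boundaries.
--     """
--     if markers is None:
--         # return error
--         return "Error: No markers provided for thought segmentation."
--
--     thoughts = []
--     current_thought = []
--     thoughts_indices_map = []  # To keep track of the indices of tokens in each thought
--     current_thought_indices = []
--
--     for i, token in enumerate(tokens):
--         current_thought.append(token)  # Add token to current thought
--         current_thought_indices.append(i)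
--
--         # If token ends with a marker or is a marker, end the current thought
--         if any(token.endswith(m) for m in markers) or token in markers:
--             if current_thought:  # Only add non-empty thoughts
--                 thoughts.append(current_thought)
--                 thoughts_indices_map.append(current_thought_indices)
--                 current_thought = []
--                 current_thought_indices = []
--
--     # Add the last thought if not empty
--     if current_thought:
--         thoughts.append(current_thought)
--         thoughts_indices_map.append(current_thought_indices)
--
--     return thoughts, thoughts_indices_map
-- ===== SOURCE B (Python) =====
-- def identify_thoughts(tokens, markers=None):
--     if markers is None:
--         return "Error: No markers provided for thought segmentation."
--
--     # pass 1: collect boundary indices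
--     boundaries = [i for i, t in enumerate(tokens)
--                   if any(t.endswith(m) for m in markers) or t in markers]
--
--     # pass 2: slice tokens at the boundaries
--     thoughts, thoughts_indices_map = [], []
--     start = 0
--     for b in boundaries:
--         thoughts.append(tokens[start:b + 1])
--         thoughts_indices_map.append(list(range(start, b + 1)))
--         start = b + 1
--     if start < len(tokens):
--         thoughts.append(tokens[start:])
--         thoughts_indices_map.append(list(range(start, len(tokens))))
--     return thoughts, thoughts_indices_map
-- ===== Notes on version B (the rewrite author's own statement) =====
-- stated objective: alternative
-- what changed: Replaces A's single stateful loop carrying a growing current-thought accumulator with a two-pass scheme: first collect the boundary indices, then slice the token list between consecutive boundaries (plus an optional tail chunk).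
import Mathlib
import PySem

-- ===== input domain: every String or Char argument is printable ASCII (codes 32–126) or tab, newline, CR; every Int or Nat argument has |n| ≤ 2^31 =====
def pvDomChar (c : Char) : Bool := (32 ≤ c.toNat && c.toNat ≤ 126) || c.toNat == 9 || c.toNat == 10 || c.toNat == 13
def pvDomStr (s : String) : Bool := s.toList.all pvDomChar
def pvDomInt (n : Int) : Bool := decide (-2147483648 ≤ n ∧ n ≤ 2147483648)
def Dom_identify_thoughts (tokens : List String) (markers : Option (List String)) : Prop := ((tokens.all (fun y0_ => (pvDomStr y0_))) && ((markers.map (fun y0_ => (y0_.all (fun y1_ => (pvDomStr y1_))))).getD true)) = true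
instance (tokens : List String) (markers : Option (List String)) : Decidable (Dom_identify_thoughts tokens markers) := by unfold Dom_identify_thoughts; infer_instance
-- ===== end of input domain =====

-- B replaces A's single stateful accumulator loop by a two-pass scheme (collect boundary
-- indices, then slice between consecutive boundaries); alternative decomposition, same cost.

-- the shared boundary test: any(token.endswith(m) for m in markers) or token in markers
def pvCond (ms : List String) (t : String) : Bool :=
  ms.any (fun m => PySem.Str.endswith t m) || ms.contains t

-- ===== PORT A =====
-- loop body of A's single for-loop (state: thoughts, current_thought, thoughts_indices_map, current_thought_indices)
def pvStepA (ms : List String)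
    (st : List (List String) × List String × List (List Int) × List Int)
    (p : Int × String) : List (List String) × List String × List (List Int) × List Int :=
  let cur := st.2.1 ++ [p.2]
  let curidx := st.2.2.2 ++ [p.1]
  if pvCond ms p.2 then
    if cur ≠ [] then (st.1 ++ [cur], [], st.2.2.1 ++ [curidx], [])
    else (st.1, cur, st.2.2.1, curidx)
  else (st.1, cur, st.2.2.1, curidx)

-- A's trailing flush: add the last thought if not empty
def pvFlushA (st : List (List String) × List String × List (List Int) × List Int) :
    List (List String) × List (List Int) :=
  if st.2.1 ≠ [] then (st.1 ++ [st.2.1], st.2.2.1 ++ [st.2.2.2]) else (st.1, st.2.2.1)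

def identify_thoughts (tokens : List String) (markers : Option (List String)) :
    List (List String) × List (List Int) :=
  match markers with
  | none => ([], [])   -- Python A returns an error STRING here (not this type); excluded by Pre_
  | some ms =>
    pvFlushA ((PySem.List.enumerate tokens 0).foldl (pvStepA ms) ([], [], [], []))

-- ===== PORT B =====
-- loop body of B's second pass (state: thoughts, thoughts_indices_map, start)
def pvStepB (tokens : List String)
    (st : List (List String) × List (List Int) × Int) (b : Int) :
    List (List String) × List (List Int) × Int :=
  (st.1 ++ [PySem.List.slice tokens (some st.2.2) (some (b + 1))],
   st.2.1 ++ [PySem.List.pyRange st.2.2 (b + 1) 1],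
   b + 1)

-- B's trailing chunk: if start < len(tokens)
def pvFlushB (tokens : List String) (st : List (List String) × List (List Int) × Int) :
    List (List String) × List (List Int) :=
  if st.2.2 < (tokens.length : Int) then
    (st.1 ++ [PySem.List.slice tokens (some st.2.2) none],
     st.2.1 ++ [PySem.List.pyRange st.2.2 (tokens.length : Int) 1])
  else (st.1, st.2.1)

def identify_thoughts_alt (tokens : List String) (markers : Option (List String)) :
    List (List String) × List (List Int) :=
  match markers with
  | none => ([], [])   -- Python B returns the same error STRING here; excluded by Pre_
  | some ms =>
    let boundaries :=
      ((PySem.List.enumerate tokens 0).filter (fun p => pvCond ms p.2)).map (fun p => p.1)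
    pvFlushB tokens (boundaries.foldl (pvStepB tokens) ([], [], 0))

-- ===== PRECONDITION & SPEC =====
-- Pre_ excludes markers = None, where A returns an error string instead of a (list, list) pair.
def Pre_identify_thoughts (tokens : List String) (markers : Option (List String)) : Prop :=
  markers.isSome = true
instance (tokens : List String) (markers : Option (List String)) : Decidable (Pre_identify_thoughts tokens markers) := by unfold Pre_identify_thoughts; infer_instance

def pvWitness_identify_thoughts : List String × Option (List String) := (["hi", "there."], some ["."])

def Spec_identify_thoughts (tokens : List String) (markers : Option (List String)) (out : List (List String) × List (List Int)) : Prop := out = identify_thoughts_alt tokens markers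
instance (tokens : List String) (markers : Option (List String)) (out : List (List String) × List (List Int)) : Decidable (Spec_identify_thoughts tokens markers out) := by unfold Spec_identify_thoughts; infer_instance

-- ===== CLAIM (what is proved, stated in full; the proofs are below) =====
def Claim_equal_identify_thoughts : Prop := ∀ (tokens : List String) (markers : Option (List String)), Dom_identify_thoughts tokens markers → Pre_identify_thoughts tokens markers → Spec_identify_thoughts tokens markers (identify_thoughts tokens markers)

-- ===== LEMMAS AND PROOFS =====

-- Invariant bridge: A's fold over the remaining enumerated tokens (with the current thought
-- being tokens[s:k]) flushes to the same pair as B's fold over the remaining boundaries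
-- (with start = s).
theorem pvBridge (ms tokens : List String) :
    ∀ (ts : List String) (s k : Nat) (th : List (List String)) (im : List (List Int)),
      s ≤ k → k ≤ tokens.length → tokens.drop k = ts →
      pvFlushA ((PySem.List.enumerate ts (k : Int)).foldl (pvStepA ms)
          (th, (tokens.drop s).take (k - s), im, PySem.List.pyRange (s : Int) (k : Int) 1))
      = pvFlushB tokens
          ((((PySem.List.enumerate ts (k : Int)).filter (fun p => pvCond ms p.2)).map
              (fun p => p.1)).foldl (pvStepB tokens) (th, im, (s : Int))) := by
  intro ts
  induction ts with
  | nil =>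
    intro s k th im hsk hk hdrop
    have hkl : tokens.length ≤ k := List.drop_eq_nil_iff.mp hdrop
    have hk' : k = tokens.length := le_antisymm hk hkl
    subst hk'
    have htake : (tokens.drop s).take (tokens.length - s) = tokens.drop s :=
      List.take_of_length_le (by simp)
    simp only [PySem.List.enumerate_nil, List.filter_nil, List.map_nil, List.foldl_nil,
      pvFlushA, pvFlushB, htake]
    by_cases hs : s < tokens.length
    · have hne : tokens.drop s ≠ [] := by
        simp [List.drop_eq_nil_iff]; omega
      rw [if_pos hne, if_pos (by exact_mod_cast hs)]
      rw [PySem.List.slice_from_natCast]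
    · have he : tokens.drop s = [] := List.drop_eq_nil_iff.mpr (by omega)
      rw [if_neg (by simp [he]), if_neg (by push_neg; exact_mod_cast not_lt.mp hs)]
  | cons t ts' ih =>
    intro s k th im hsk hk hdrop
    have hklt : k < tokens.length := by
      by_contra h
      have : tokens.drop k = [] := List.drop_eq_nil_iff.mpr (by omega)
      rw [hdrop] at this; cases this
    have hdrop' : tokens.drop (k + 1) = ts' := by
      have h1 : tokens.drop (k + 1) = (tokens.drop k).drop 1 := by
        rw [List.drop_drop]
      rw [h1, hdrop]; rfl
    have htk : tokens[k]? = some t := by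
      have h0 : (tokens.drop k)[0]? = tokens[k + 0]? := List.getElem?_drop
      rw [hdrop] at h0
      simpa using h0.symm
    have hext : ∀ s' : Nat, s' ≤ k →
        (tokens.drop s').take (k - s' + 1) = (tokens.drop s').take (k - s') ++ [t] := by
      intro s' hs'
      rw [List.take_add_one]
      have : (tokens.drop s')[k - s']? = some t := by
        rw [List.getElem?_drop]
        rw [show s' + (k - s') = k from by omega]
        exact htk
      rw [this]; rfl
    have hcast : ((k : Int) + 1) = ((k + 1 : Nat) : Int) := by push_cast; ring
    rw [PySem.List.enumerate_cons, hcast]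
    simp only [List.foldl_cons, List.filter_cons]
    by_cases hp : pvCond ms t = true
    · -- boundary token: both sides close the current chunk at k
      simp only [hp, if_pos, pvStepA]
      simp only [List.map_cons, List.foldl_cons, pvStepB]
      have hIH := ih (k + 1) (k + 1) (th ++ [(tokens.drop s).take (k - s) ++ [t]])
        (im ++ [PySem.List.pyRange (s : Int) (k : Int) 1 ++ [(k : Int)]])
        (le_refl _) (by omega) hdrop'
      simp only [Nat.sub_self, List.take_zero, PySem.List.pyRange_one_eq_nil (le_refl _)] at hIH
      have hslice : PySem.List.slice tokens (some (s : Int)) (some ((k : Int) + 1))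
          = (tokens.drop s).take (k - s) ++ [t] := by
        rw [hcast, PySem.List.slice_natCast]
        rw [show k + 1 - s = k - s + 1 from by omega]
        exact hext s hsk
      have hrange : PySem.List.pyRange (s : Int) ((k : Int) + 1) 1
          = PySem.List.pyRange (s : Int) (k : Int) 1 ++ [(k : Int)] := by
        exact PySem.List.pyRange_one_succ_right (by exact_mod_cast hsk)
      simp only [ne_eq, List.append_ne_nil_of_right_ne_nil, List.cons_ne_self,
        not_false_eq_true, if_true]
      rw [hslice, hrange] at *
      convert hIH using 3 <;> simp
    · -- not a boundary: the current chunk grows on the A side, start unchanged on the B side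
      simp only [Bool.not_eq_true] at hp
      simp only [pvStepA, hp, Bool.false_eq_true, if_false]
      have hIH := ih s (k + 1) th im (by omega) (by omega) hdrop'
      rw [show k + 1 - s = k - s + 1 from by omega, hext s hsk] at hIH
      have hrange : PySem.List.pyRange (s : Int) ((k + 1 : Nat) : Int) 1
          = PySem.List.pyRange (s : Int) (k : Int) 1 ++ [(k : Int)] := by
        rw [← hcast]
        exact PySem.List.pyRange_one_succ_right (by exact_mod_cast hsk)
      rw [hrange] at hIH
      exact hIH

-- ===== VERDICT (by name: the statement is the Claim_ definition above) =====
theorem identify_thoughts_spec : Claim_equal_identify_thoughts := by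
  intro tokens markers _hdom hpre
  match markers with
  | none => simp [Pre_identify_thoughts] at hpre
  | some ms =>
    show identify_thoughts tokens (some ms) = identify_thoughts_alt tokens (some ms)
    unfold identify_thoughts identify_thoughts_alt
    have h := pvBridge ms tokens tokens 0 0 [] [] (le_refl 0) (Nat.zero_le _) rfl
    simpa using h
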